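-- pv_equiv track=rewrite | github.com/rodrigorahal/advent-of-code-2023 | 10/maze.py | dfs
-- ===== SOURCE A (Python) =====
-- CONNECTIONS = {
--     "|": {
--         (-1, 0): ["|", "7", "F"],
--         (1, 0): ["|", "L", "J"],
--     },
--     "-": {
--         (0, -1): ["-", "L", "F"],
--         (0, 1): ["-", "J", "7"],
--     },
--     "L": {
--         (-1, 0): ["|", "7", "F"],
--         (0, 1): ["-", "J", "7"],
--     },
--     "J": {
--         (-1, 0): ["|", "7", "F"],
--         (0, -1): ["-", "L", "F"],
--     },
--     "7": {
--         (1, 0): ["|", "L", "J"],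
--         (0, -1): ["-", "L", "F"],
--     },
--     "F": {
--         (1, 0): ["|", "L", "J"],
--         (0, 1): ["-", "J", "7"],
--     },
-- }
--
-- def neighbours(grid, row, col):
--     H, W = len(grid), len(grid[0])
--     pipe = grid[row][col]
--     ns = []
--     for dr, dc in CONNECTIONS[pipe]:
--         if 0 <= (row + dr) < H and 0 <= (col + dc) < W:
--             if grid[row + dr][col + dc] in CONNECTIONS[pipe][(dr, dc)]:
--                 ns.append((row + dr, col + dc))
--     return ns
--
-- def dfs(grid, start, parent=None, finished=None, seen=None, path=None):
--     if not finished: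
--         finished = set()
--     if not seen:
--         seen = {}
--     if not path:
--         path = []
--
--     row, col = start
--     if (row, col) in finished:
--         return False, path
--
--     if (row, col) in seen:
--         return True, path
--
--     seen[(row, col)] = True
--     path.append((row, col))
--     for nrow, ncol in neighbours(grid, row, col):
--         if grid[nrow][col] == ".":
--             continue
--         if (nrow, ncol) == parent:
--             continue
--         found, path = dfs(grid, (nrow, ncol), (row, col), finished, seen, path)
--         if found:
--             return found, path
--     # finished[(row, col)] = True
--     finished.add((row, col))
--     return False, path
-- ===== SOURCE B (Python) =====
-- CONNECTIONS = {
--     "|": {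
--         (-1, 0): ["|", "7", "F"],
--         (1, 0): ["|", "L", "J"],
--     },
--     "-": {
--         (0, -1): ["-", "L", "F"],
--         (0, 1): ["-", "J", "7"],
--     },
--     "L": {
--         (-1, 0): ["|", "7", "F"],
--         (0, 1): ["-", "J", "7"],
--     },
--     "J": {
--         (-1, 0): ["|", "7", "F"],
--         (0, -1): ["-", "L", "F"],
--     },
--     "7": {
--         (1, 0): ["|", "L", "J"],
--         (0, -1): ["-", "L", "F"],
--     },
--     "F": {
--         (1, 0): ["|", "L", "J"],
--         (0, 1): ["-", "J", "7"],
--     },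
-- }
--
-- def neighbours(grid, row, col):
--     H, W = len(grid), len(grid[0])
--     pipe = grid[row][col]
--     ns = []
--     for dr, dc in CONNECTIONS[pipe]:
--         if 0 <= (row + dr) < H and 0 <= (col + dc) < W:
--             if grid[row + dr][col + dc] in CONNECTIONS[pipe][(dr, dc)]:
--                 ns.append((row + dr, col + dc))
--     return ns
--
-- def dfs(grid, start, parent=None, finished=None, seen=None, path=None):
--     # iterative DFS: explicit stack of frames (node, parent, remaining neighbours or None)
--     if not finished:
--         finished = set()
--     if not seen:
--         seen = {}
--     if not path:
--         path = []
--     stack = [(start, parent, None)]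
--     while stack:
--         node, par, ns = stack.pop()
--         if ns is None:
--             # first touch of this node's frame
--             if node in finished:
--                 continue
--             if node in seen:
--                 return True, path
--             seen[node] = True
--             path.append(node)
--             stack.append((node, par, neighbours(grid, node[0], node[1])))
--         elif not ns:
--             # all neighbours handled without a hit
--             finished.add(node)
--         else:
--             c, rest = ns[0], ns[1:]
--             stack.append((node, par, rest))
--             if grid[c[0]][node[1]] != "." and c != par:
--                 stack.append((c, node, None))
--     return False, path
-- ===== Notes on version B (the rewrite author's own statement) =====
-- stated objective: alternative
-- what changed: A's recursive DFS (implicit call stack, early-return unwind) is replaced by an iterative DFS driven by an explicit stack of frames (node, parent, remaining-neighbour list), preserving the visiting order, the early True return and the finished-marking on exhaustion.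
import Mathlib
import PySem

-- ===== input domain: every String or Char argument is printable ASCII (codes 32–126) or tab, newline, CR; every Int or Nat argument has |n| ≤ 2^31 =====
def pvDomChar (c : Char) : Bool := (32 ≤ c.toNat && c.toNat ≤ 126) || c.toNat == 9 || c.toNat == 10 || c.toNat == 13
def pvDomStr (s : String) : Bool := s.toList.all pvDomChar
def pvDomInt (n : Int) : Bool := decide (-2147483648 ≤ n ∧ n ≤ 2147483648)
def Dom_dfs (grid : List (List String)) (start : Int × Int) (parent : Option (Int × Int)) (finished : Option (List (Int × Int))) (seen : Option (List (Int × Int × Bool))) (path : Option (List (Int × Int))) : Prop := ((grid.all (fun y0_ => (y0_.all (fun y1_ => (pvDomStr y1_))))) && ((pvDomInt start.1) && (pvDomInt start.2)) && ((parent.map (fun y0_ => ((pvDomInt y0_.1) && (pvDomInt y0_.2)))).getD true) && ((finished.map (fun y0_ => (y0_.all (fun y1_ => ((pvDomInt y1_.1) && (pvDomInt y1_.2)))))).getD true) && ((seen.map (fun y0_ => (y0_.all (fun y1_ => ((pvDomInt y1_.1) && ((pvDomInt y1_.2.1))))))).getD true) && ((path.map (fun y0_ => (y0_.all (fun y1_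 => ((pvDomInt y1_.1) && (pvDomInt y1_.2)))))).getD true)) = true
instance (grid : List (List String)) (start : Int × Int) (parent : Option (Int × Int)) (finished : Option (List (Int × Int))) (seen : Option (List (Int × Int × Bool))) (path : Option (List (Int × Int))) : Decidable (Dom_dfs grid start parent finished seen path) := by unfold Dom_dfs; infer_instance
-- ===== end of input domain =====

-- B replaces A's recursion by an explicit-stack iteration (frames hold node, parent and the
-- remaining neighbour list); same visiting order and same return value. Both A and B mutate
-- finished/seen/path in place in the identical order; the equivalence proved here is about the
-- return value. The Lean ports carry a fuel counter solely as a totality guard (B's per-frame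
-- fuel plays no algorithmic role); the proofs hold for every fuel value.

-- ===== PORT A =====
-- shared module context: CONNECTIONS and neighbours (used verbatim by both Source A and Source B)
def pvCell (grid : List (List String)) (r c : Int) : String :=
  (((PySem.List.pyGet? grid r).bind (fun row => PySem.List.pyGet? row c)).getD "")

def pvConnections (p : String) : List ((Int × Int) × List String) :=
  if p = "|" then [((-1, 0), ["|", "7", "F"]), ((1, 0), ["|", "L", "J"])]
  else if p = "-" then [((0, -1), ["-", "L", "F"]), ((0, 1), ["-", "J", "7"])]
  else if p = "L" then [((-1, 0), ["|", "7", "F"]), ((0, 1), ["-", "J", "7"])]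
  else if p = "J" then [((-1, 0), ["|", "7", "F"]), ((0, -1), ["-", "L", "F"])]
  else if p = "7" then [((1, 0), ["|", "L", "J"]), ((0, -1), ["-", "L", "F"])]
  else if p = "F" then [((1, 0), ["|", "L", "J"]), ((0, 1), ["-", "J", "7"])]
  else []   -- Python raises KeyError here; excluded by Pre_dfs

def pvNeighbours (grid : List (List String)) (row col : Int) : List (Int × Int) :=
  let H : Int := grid.length
  let W : Int := ((grid.headD []).length : Int)   -- grid[0]; empty grid raises in Python (outside Pre_)
  let pipe := pvCell grid row col
  (pvConnections pipe).foldl (fun ns p =>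
    if 0 ≤ row + p.1.1 ∧ row + p.1.1 < H ∧ 0 ≤ col + p.1.2 ∧ col + p.1.2 < W then
      if p.2.contains (pvCell grid (row + p.1.1) (col + p.1.2)) then ns ++ [(row + p.1.1, col + p.1.2)]
      else ns
    else ns) []

-- foldl in pvNeighbours appends at most one element per connection entry (needed for termination of pvStep)
theorem pvNeighbours_foldl_len (grid : List (List String)) (row col H W : Int) :
    ∀ (l : List ((Int × Int) × List String)) (acc : List (Int × Int)),
      (l.foldl (fun ns p =>
        if 0 ≤ row + p.1.1 ∧ row + p.1.1 < H ∧ 0 ≤ col + p.1.2 ∧ col + p.1.2 < W then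
          if p.2.contains (pvCell grid (row + p.1.1) (col + p.1.2)) then ns ++ [(row + p.1.1, col + p.1.2)]
          else ns
        else ns) acc).length ≤ acc.length + l.length := by
  intro l
  induction l with
  | nil => intro acc; simp
  | cons hd tl ih =>
    intro acc
    simp only [List.foldl_cons, List.length_cons]
    split_ifs <;> [skip; skip; skip] <;>
      first
        | (calc _ ≤ (acc ++ [(row + hd.1.1, col + hd.1.2)]).length + tl.length := ih _
              _ ≤ acc.length + (tl.length + 1) := by simp; omega)
        | (calc _ ≤ acc.length + tl.length := ih _
              _ ≤ acc.length + (tl.length + 1) := by omega)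

theorem pvConnections_len (p : String) : (pvConnections p).length ≤ 2 := by
  unfold pvConnections; split_ifs <;> simp

theorem pvNeighbours_len (grid : List (List String)) (row col : Int) :
    (pvNeighbours grid row col).length ≤ 2 := by
  unfold pvNeighbours
  have h := pvNeighbours_foldl_len grid row col (grid.length : Int) ((grid.headD []).length : Int)
      (pvConnections (pvCell grid row col)) []
  have h2 := pvConnections_len (pvCell grid row col)
  simpa using le_trans h (by simpa using h2)

mutual
def pvDfsA (grid : List (List String)) : Nat → (Int × Int) → Option (Int × Int) →
    PySem.Set (Int × Int) → PySem.Dict (Int × Int) Bool → List (Int × Int) →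
    Bool × PySem.Set (Int × Int) × PySem.Dict (Int × Int) Bool × List (Int × Int)
  | 0, _, _, fin, sn, path => (false, fin, sn, path)   -- fuel guard only; never reached from dfs on Pre_ inputs
  | g + 1, node, par, fin, sn, path =>
    if PySem.Set.contains fin node then (false, fin, sn, path)
    else if PySem.Dict.contains sn node then (true, fin, sn, path)
    else pvLoopA grid g node par (pvNeighbours grid node.1 node.2)
           fin (PySem.Dict.insert sn node true) (path ++ [node])
termination_by g _ _ _ _ _ => (g, 0)

def pvLoopA (grid : List (List String)) : Nat → (Int × Int) → Option (Int × Int) →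
    List (Int × Int) → PySem.Set (Int × Int) → PySem.Dict (Int × Int) Bool → List (Int × Int) →
    Bool × PySem.Set (Int × Int) × PySem.Dict (Int × Int) Bool × List (Int × Int)
  | _, node, _, [], fin, sn, path => (false, PySem.Set.add fin node, sn, path)
  | f, node, par, c :: rest, fin, sn, path =>
    if pvCell grid c.1 node.2 = "." then pvLoopA grid f node par rest fin sn path
    else if par = some c then pvLoopA grid f node par rest fin sn path
    else
      match pvDfsA grid f c (some node) fin sn path with
      | (true, fin', sn', path') => (true, fin', sn', path')
      | (false, fin', sn', path') => pvLoopA grid f node par rest fin' sn' path'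
termination_by f _ _ ns _ _ _ => (f, ns.length + 1)
end

def dfs (grid : List (List String)) (start : Int × Int) (parent : Option (Int × Int)) (finished : Option (List (Int × Int))) (seen : Option (List (Int × Int × Bool))) (path : Option (List (Int × Int))) : Bool × (List (Int × Int)) :=
  -- `if not finished: finished = set()` etc.: None and the empty container are both falsy
  match pvDfsA grid (grid.length * (grid.headD []).length + 2) start parent
      (PySem.Set.ofList (finished.getD []))
      (PySem.Dict.ofList ((seen.getD []).map (fun t => ((t.1, t.2.1), t.2.2))))
      (path.getD []) with
  | (found, _, _, path') => (found, path')

-- ===== PORT B =====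
inductive PvFrame where
  | fresh : (Int × Int) → Option (Int × Int) → Nat → PvFrame        -- (node, par, fuel): ns = None
  | cont : (Int × Int) → Option (Int × Int) → Nat → List (Int × Int) → PvFrame  -- remaining neighbours
deriving DecidableEq, Repr

def pvWeight : PvFrame → Nat
  | .fresh _ _ g => 8 ^ g
  | .cont _ _ f ns => ns.length * (8 ^ f + 1) + 1

def pvM (stack : List PvFrame) : Nat := (stack.map pvWeight).sum

def pvStep (grid : List (List String)) :
    List PvFrame → PySem.Set (Int × Int) → PySem.Dict (Int × Int) Bool → List (Int × Int) →
    Bool × PySem.Set (Int × Int) × PySem.Dict (Int × Int) Bool × List (Int × Int)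
  | [], fin, sn, path => (false, fin, sn, path)
  | PvFrame.fresh node par g :: rest, fin, sn, path =>
    match g with
    | 0 => pvStep grid rest fin sn path   -- fuel guard only; never reached from dfs_alt on Pre_ inputs
    | f + 1 =>
      if PySem.Set.contains fin node then pvStep grid rest fin sn path
      else if PySem.Dict.contains sn node then (true, fin, sn, path)
      else pvStep grid (PvFrame.cont node par f (pvNeighbours grid node.1 node.2) :: rest)
             fin (PySem.Dict.insert sn node true) (path ++ [node])
  | PvFrame.cont node _ _ [] :: rest, fin, sn, path =>
    pvStep grid rest (PySem.Set.add fin node) sn path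
  | PvFrame.cont node par f (c :: rest') :: rest, fin, sn, path =>
    if pvCell grid c.1 node.2 ≠ "." ∧ ¬ (some c = par) then
      pvStep grid (PvFrame.fresh c (some node) f :: PvFrame.cont node par f rest' :: rest) fin sn path
    else
      pvStep grid (PvFrame.cont node par f rest' :: rest) fin sn path
termination_by stack _ _ _ => pvM stack
decreasing_by
  all_goals simp only [pvM, pvWeight, List.map_cons, List.sum_cons, List.length_cons,
    pow_succ, pow_zero]
  · omega
  · have h8 : 0 < 8 ^ f := Nat.pow_pos (by norm_num); omega
  · have h := pvNeighbours_len grid node.1 node.2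
    have h8 : 0 < 8 ^ f := Nat.pow_pos (by norm_num)
    nlinarith
  · omega
  · have h : (rest'.length + 1) * (8 ^ f + 1) = rest'.length * (8 ^ f + 1) + (8 ^ f + 1) := by ring
    omega
  · have h : (rest'.length + 1) * (8 ^ f + 1) = rest'.length * (8 ^ f + 1) + (8 ^ f + 1) := by ring
    have h8 : 0 < 8 ^ f := Nat.pow_pos (by norm_num)
    omega

def dfs_alt (grid : List (List String)) (start : Int × Int) (parent : Option (Int × Int)) (finished : Option (List (Int × Int))) (seen : Option (List (Int × Int × Bool))) (path : Option (List (Int × Int))) : Bool × (List (Int × Int)) :=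
  match pvStep grid [PvFrame.fresh start parent (grid.length * (grid.headD []).length + 2)]
      (PySem.Set.ofList (finished.getD []))
      (PySem.Dict.ofList ((seen.getD []).map (fun t => ((t.1, t.2.1), t.2.2))))
      (path.getD []) with
  | (found, _, _, path') => (found, path')

-- ===== PRECONDITION & SPEC =====
-- Pre_dfs admits exactly the closed-form inputs where A provably returns: start already in
-- finished/seen (no grid access), or a rectangular grid with start in (possibly one-wrap negative)
-- range holding a pipe character. It excludes the inputs where A raises KeyError/IndexError and,
-- conservatively, ragged grids on which A may still return by luck of which cells the traversal
-- reaches — that set is not expressible without re-running the traversal.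
def Pre_dfs (grid : List (List String)) (start : Int × Int) (parent : Option (Int × Int)) (finished : Option (List (Int × Int))) (seen : Option (List (Int × Int × Bool))) (path : Option (List (Int × Int))) : Prop :=
  start ∈ finished.getD [] ∨
  ((seen.getD []).any (fun t => (t.1, t.2.1) = start)) = true ∨
  (grid ≠ [] ∧
   (∀ row ∈ grid, row.length = (grid.headD []).length) ∧
   -(grid.length : Int) ≤ start.1 ∧ start.1 < (grid.length : Int) ∧
   -((grid.headD []).length : Int) ≤ start.2 ∧ start.2 < ((grid.headD []).length : Int) ∧
   (((PySem.List.pyGet? grid start.1).bind (fun row => PySem.List.pyGet? row start.2)).getD "")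
     ∈ (["|", "-", "L", "J", "7", "F"] : List String))
instance (grid : List (List String)) (start : Int × Int) (parent : Option (Int × Int)) (finished : Option (List (Int × Int))) (seen : Option (List (Int × Int × Bool))) (path : Option (List (Int × Int))) : Decidable (Pre_dfs grid start parent finished seen path) := by unfold Pre_dfs; infer_instance

def pvWitness_dfs : List (List String) × (Int × Int) × (Option (Int × Int)) × (Option (List (Int × Int))) × (Option (List (Int × Int × Bool))) × (Option (List (Int × Int))) :=
  ([["7", "F"], ["L", "J"]], (0, 0), none, none, none, none)

def Spec_dfs (grid : List (List String)) (start : Int × Int) (parent : Option (Int × Int)) (finished : Option (List (Int × Int))) (seen : Option (List (Int × Int × Bool))) (path : Option (List (Int × Int))) (out : Bool × (List (Int × Int))) : Prop := out = dfs_alt grid start parent finished seen path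
instance (grid : List (List String)) (start : Int × Int) (parent : Option (Int × Int)) (finished : Option (List (Int × Int))) (seen : Option (List (Int × Int × Bool))) (path : Option (List (Int × Int))) (out : Bool × (List (Int × Int))) : Decidable (Spec_dfs grid start parent finished seen path out) := by unfold Spec_dfs; infer_instance

-- ===== CLAIM (what is proved, stated in full; the proofs are below) =====
def Claim_equal_dfs : Prop := ∀ (grid : List (List String)) (start : Int × Int) (parent : Option (Int × Int)) (finished : Option (List (Int × Int))) (seen : Option (List (Int × Int × Bool))) (path : Option (List (Int × Int))), Dom_dfs grid start parent finished seen path → Pre_dfs grid start parent finished seen path → Spec_dfs grid start parent finished seen path (dfs grid start parent finished seen path)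

-- ===== LEMMAS AND PROOFS =====

-- the stack machine run on a `cont` frame first runs A's neighbour loop, then continues with the rest
theorem pvStep_cont (grid : List (List String)) (f : Nat)
    (hP : ∀ node par rest fin sn path,
      pvStep grid (PvFrame.fresh node par f :: rest) fin sn path =
        match pvDfsA grid f node par fin sn path with
        | (true, fin', sn', path') => (true, fin', sn', path')
        | (false, fin', sn', path') => pvStep grid rest fin' sn' path') :
    ∀ (ns : List (Int × Int)) node par rest fin sn path,
      pvStep grid (PvFrame.cont node par f ns :: rest) fin sn path =
        match pvLoopA grid f node par ns fin sn path with
        | (true, fin', sn', path') => (true, fin', sn', path')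
        | (false, fin', sn', path') => pvStep grid rest fin' sn' path' := by
  intro ns
  induction ns with
  | nil =>
    intro node par rest fin sn path
    simp only [pvStep, pvLoopA]
  | cons c rest' ih =>
    intro node par rest fin sn path
    by_cases h1 : pvCell grid c.1 node.2 = "."
    · simp only [pvStep, pvLoopA, h1]
      simpa using ih node par rest fin sn path
    · by_cases h2 : par = some c
      · simp only [pvStep, pvLoopA, h1, h2]
        simpa [h2] using ih node par rest fin sn path
      · have h2' : ¬ (some c = par) := fun h => h2 h.symm
        simp only [pvStep, pvLoopA, h1, h2, h2', not_false_iff, and_true, if_true, if_false, ne_eq]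
        rw [hP c (some node) (PvFrame.cont node par f rest' :: rest) fin sn path]
        rcases hr : pvDfsA grid f c (some node) fin sn path with ⟨found, fin', sn', path'⟩
        cases found
        · simpa using ih node par rest fin' sn' path'
        · rfl

-- the stack machine run on a `fresh` frame first runs A's recursive dfs, then continues with the rest
theorem pvStep_fresh (grid : List (List String)) :
    ∀ (g : Nat) node par rest fin sn path,
      pvStep grid (PvFrame.fresh node par g :: rest) fin sn path =
        match pvDfsA grid g node par fin sn path with
        | (true, fin', sn', path') => (true, fin', sn', path')
        | (false, fin', sn', path') => pvStep grid rest fin' sn' path' := by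
  intro g
  induction g with
  | zero =>
    intro node par rest fin sn path
    simp only [pvStep, pvDfsA]
  | succ f ih =>
    intro node par rest fin sn path
    simp only [pvStep, pvDfsA]
    split_ifs with hfin hseen
    · rfl
    · rfl
    · exact pvStep_cont grid f ih (pvNeighbours grid node.1 node.2) node par rest fin
        (PySem.Dict.insert sn node true) (path ++ [node])

-- ===== VERDICT (by name: the statement is the Claim_ definition above) =====
theorem dfs_spec : Claim_equal_dfs := by
  intro grid start parent finished seen path _ _
  unfold Spec_dfs dfs dfs_alt
  rw [pvStep_fresh]
  rcases hr : pvDfsA grid (grid.length * (grid.headD []).length + 2) start parent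
      (PySem.Set.ofList (finished.getD []))
      (PySem.Dict.ofList ((seen.getD []).map (fun t => ((t.1, t.2.1), t.2.2))))
      (path.getD []) with ⟨found, fin', sn', path'⟩
  rw [hr]
  cases found <;> simp [pvStep]
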